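-- pv_equiv track=rewrite | github.com/Strady/smart-home-demo | axiomLib/funclib.py | calculate_click_tokens
-- ===== SOURCE A (Python) =====
-- def calculate_click_tokens(queue_length):
--     """
--     Рассчитываеются признаки длинного и короткого нажатия,
--     в зависимости от заданной длины очереди
--     :param queue_length: длина очереди
--     :return: признаки длинного и короткого нажатия
--     """
--     short_click_tokens = []
--     empty = [0] * queue_length
--     for i in range(queue_length - 2):
--         empty[i + 1] = 1
--         temp = empty[:]
--         short_click_tokens.append(temp)
--
--     long_click_tokens = [[0] + [1] * (queue_length - 1),
--                         [1] * queue_length,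
--                         [1] * (queue_length - 1) + [0]]
--
--     return short_click_tokens, long_click_tokens
-- ===== SOURCE B (Python) =====
-- def calculate_click_tokens(queue_length):
--     # Column-wise construction: build each COLUMN of the short-click matrix
--     # (column j is a run of zeros then a run of ones), then transpose with zip.
--     m = queue_length - 2  # number of short-click rows
--     if m > 0:
--         cols = [[0] * (j - 1) + [1] * (m - j + 1) if 1 <= j <= m else [0] * m
--                 for j in range(queue_length)]
--         short_click_tokens = [list(row) for row in zip(*cols)]
--     else:
--         short_click_tokens = []
--     long_click_tokens = [[0] + [1] * (queue_length - 1),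
--                          [1] * queue_length,
--                          [1] * (queue_length - 1) + [0]]
--     return short_click_tokens, long_click_tokens
-- ===== Notes on version B (the rewrite author's own statement) =====
-- stated objective: alternative
-- what changed: B builds the short-click matrix column by column (each column is a zero-run followed by a one-run) and transposes with zip, instead of A's row loop that mutates and copies a shared buffer.
import Mathlib
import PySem

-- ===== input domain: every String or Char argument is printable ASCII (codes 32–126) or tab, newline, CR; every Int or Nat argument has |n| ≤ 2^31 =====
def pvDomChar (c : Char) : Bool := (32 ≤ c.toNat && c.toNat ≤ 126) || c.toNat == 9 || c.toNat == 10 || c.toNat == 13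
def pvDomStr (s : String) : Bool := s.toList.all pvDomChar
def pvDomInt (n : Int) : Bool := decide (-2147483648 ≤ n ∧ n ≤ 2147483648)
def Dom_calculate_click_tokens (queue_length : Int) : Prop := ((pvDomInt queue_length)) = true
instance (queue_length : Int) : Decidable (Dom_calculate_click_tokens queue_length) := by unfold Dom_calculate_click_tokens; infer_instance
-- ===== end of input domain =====

-- B builds the short-click matrix column by column and transposes with zip, instead of
-- A's row loop mutating and copying a shared buffer (alternative decomposition, same cost).
-- Both programs are total.

-- ===== PORT A =====
-- [0] * queue_length → List.replicate queue_length.toNat 0 (Python gives [] for n ≤ 0, matching toNat)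
-- empty[i + 1] = 1 → List.set (i+1).toNat 1; exact here since 0 ≤ i and i+1 < queue_length on every iteration
def calculate_click_tokens (queue_length : Int) : List (List Int) × List (List Int) :=
  let st := (PySem.List.pyRange 0 (queue_length - 2) 1).foldl
    (fun (st : List (List Int) × List Int) i =>
      let empty := st.2.set (i + 1).toNat 1
      (st.1 ++ [empty], empty))
    (([] : List (List Int)), List.replicate queue_length.toNat 0)
  let long_click_tokens : List (List Int) :=
    [0 :: List.replicate (queue_length - 1).toNat 1,
     List.replicate queue_length.toNat 1,
     List.replicate (queue_length - 1).toNat 1 ++ [0]]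
  (st.1, long_click_tokens)

-- ===== PORT B =====
-- pvZipStar is Source B's '[list(row) for row in zip(*cols)]': emit the heads of all columns,
-- recurse on the tails, stop when some column is exhausted; exact Python zip semantics for
-- a nonempty argument list (B only calls it with queue_length ≥ 3 columns).
def pvZipStar (cols : List (List Int)) : List (List Int) :=
  match cols with
  | [] => []
  | c :: cs =>
    if (c :: cs).any (·.isEmpty) then []
    else ((c :: cs).map (fun l => l.headD 0)) :: pvZipStar ((c :: cs).map (·.tail))
termination_by (cols.headD []).length
decreasing_by
  simp_all [List.isEmpty_iff]
  cases c with
  | nil => simp_all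
  | cons x xs => simp

def calculate_click_tokens_alt (queue_length : Int) : List (List Int) × List (List Int) :=
  let m := queue_length - 2
  let short_click_tokens : List (List Int) :=
    if m > 0 then
      pvZipStar ((PySem.List.pyRange 0 queue_length 1).map (fun j =>
        if 1 ≤ j ∧ j ≤ m then
          List.replicate (j - 1).toNat 0 ++ List.replicate (m - j + 1).toNat 1
        else List.replicate m.toNat 0))
    else []
  let long_click_tokens : List (List Int) :=
    [0 :: List.replicate (queue_length - 1).toNat 1,
     List.replicate queue_length.toNat 1,
     List.replicate (queue_length - 1).toNat 1 ++ [0]]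
  (short_click_tokens, long_click_tokens)

-- ===== PRECONDITION & SPEC =====
def Spec_calculate_click_tokens (queue_length : Int) (out : List (List Int) × List (List Int)) : Prop := out = calculate_click_tokens_alt queue_length
instance (queue_length : Int) (out : List (List Int) × List (List Int)) : Decidable (Spec_calculate_click_tokens queue_length out) := by unfold Spec_calculate_click_tokens; infer_instance

-- ===== CLAIM (what is proved, stated in full; the proofs are below) =====
def Claim_equal_calculate_click_tokens : Prop := ∀ (queue_length : Int), Dom_calculate_click_tokens queue_length → Spec_calculate_click_tokens queue_length (calculate_click_tokens queue_length)

-- ===== LEMMAS AND PROOFS =====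

-- the buffer A carries after m loop iterations (valid for queue_length ≥ 3, m ≤ queue_length - 2)
def pvBuf (ql : Int) (m : Nat) : List Int :=
  0 :: (List.replicate m 1 ++ List.replicate (ql.toNat - m - 1) 0)

-- the i-th short-click row, closed form
def pvRow (ql : Int) (k : Nat) : List Int :=
  0 :: (List.replicate (k + 1) 1 ++ List.replicate (ql.toNat - k - 2) 0)

lemma set_mid (m r : Nat) :
    (List.replicate m (1 : Int) ++ (0 : Int) :: List.replicate r 0).set m 1
      = List.replicate (m + 1) (1 : Int) ++ List.replicate r 0 := by
  induction m with
  | zero => simp [List.replicate_succ]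
  | succ n ih => simp [List.replicate_succ, ih]

lemma buf_set (ql : Int) (m : Nat) (h3 : 3 ≤ ql) (hm : (m : Int) ≤ ql - 3) :
    (pvBuf ql m).set (m + 1) 1 = pvBuf ql (m + 1) := by
  have hr : ql.toNat - m - 1 = (ql.toNat - m - 2) + 1 := by omega
  have := set_mid m (ql.toNat - m - 2)
  simp only [pvBuf, hr, List.replicate_succ, List.set]
  simpa [List.replicate_succ] using this

lemma loop_inv (ql : Int) (h3 : 3 ≤ ql) (m : Nat) (hm : (m : Int) ≤ ql - 2) :
    (PySem.List.pyRange 0 (m : Int) 1).foldl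
      (fun (st : List (List Int) × List Int) i =>
        let empty := st.2.set (i + 1).toNat 1
        (st.1 ++ [empty], empty))
      (([] : List (List Int)), List.replicate ql.toNat 0)
      = ((List.range m).map (pvRow ql), pvBuf ql m) := by
  induction m with
  | zero =>
    obtain ⟨t, ht⟩ : ∃ t, ql.toNat = t + 1 := ⟨ql.toNat - 1, by omega⟩
    simp [pvBuf, ht, List.replicate_succ]
  | succ n ih =>
    have hn : (n : Int) ≤ ql - 2 := by push_cast at hm ⊢; omega
    have hsplit : PySem.List.pyRange 0 ((n : Nat) + 1 : Int) 1
        = PySem.List.pyRange 0 (n : Int) 1 ++ [(n : Int)] := by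
      have := PySem.List.pyRange_one_succ_right (a := 0) (b := (n : Int)) (by positivity)
      simpa using this
    have hcast : ((n + 1 : Nat) : Int) = ((n : Nat) + 1 : Int) := by push_cast; ring
    rw [hcast, hsplit, List.foldl_append, ih hn]
    have hset : (pvBuf ql n).set ((n : Int) + 1).toNat 1 = pvBuf ql (n + 1) := by
      have : ((n : Int) + 1).toNat = n + 1 := by omega
      rw [this]
      exact buf_set ql n h3 (by push_cast at hm ⊢; omega)
    have hrow : pvBuf ql (n + 1) = pvRow ql n := by
      have h : ql.toNat - (n + 1) - 1 = ql.toNat - n - 2 := by omega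
      simp [pvBuf, pvRow, h]
    simp only [List.foldl_cons, List.foldl_nil, hset]
    rw [List.range_succ, List.map_append]
    simp [hrow]

-- zip(*cols) on equal-length nonempty column lists is the row-indexed matrix
lemma zipStar_uniform (m : Nat) :
    ∀ (cols : List (List Int)), cols ≠ [] → (∀ c ∈ cols, c.length = m) →
    pvZipStar cols = (List.range m).map (fun i => cols.map (fun c => c.getD i 0)) := by
  induction m with
  | zero =>
    intro cols hne hlen
    match cols with
    | c :: cs =>
      have hc : c = [] := List.length_eq_zero_iff.mp (hlen c (by simp))
      rw [pvZipStar]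
      simp [hc]
  | succ k ih =>
    intro cols hne hlen
    match cols with
    | c :: cs =>
      have hno : ((c :: cs).any (·.isEmpty)) = false := by
        rw [List.any_eq_false]
        intro x hx
        have hl := hlen x hx
        cases x <;> simp_all
      rw [pvZipStar, hno]
      simp only [Bool.false_eq_true, if_false]
      have htl : pvZipStar ((c :: cs).map (·.tail))
          = (List.range k).map (fun i => ((c :: cs).map (·.tail)).map (fun c => c.getD i 0)) := by
        apply ih
        · simp
        · intro t ht
          obtain ⟨x, hx, rfl⟩ := List.mem_map.mp ht
          have := hlen x hx
          simp [this]
      rw [htl, List.range_succ_eq_map]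
      simp only [List.map_cons, List.map_map]
      have hHG : ∀ x : List Int, x ∈ (c :: cs) → x.headD 0 = x.getD 0 0 := by
        intro x hx
        have hl := hlen x hx
        cases x with
        | nil => simp at hl
        | cons a as => simp [List.getD]
      have hTG : ∀ x : List Int, x ∈ (c :: cs) → ∀ i, x.tail.getD i 0 = x.getD (i + 1) 0 := by
        intro x hx i
        have hl := hlen x hx
        cases x with
        | nil => simp at hl
        | cons a as => simp [List.getD]
      congr 1
      · congr 1
        · exact hHG c (by simp)
        · apply List.map_congr_left
          intro x hx
          exact hHG x (by simp [hx])
      · apply List.map_congr_left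
        intro i _
        simp only [Function.comp_apply]
        congr 1
        · exact hTG c (by simp) i
        · apply List.map_congr_left
          intro x hx
          simp only [Function.comp_apply]
          exact hTG x (by simp [hx]) i

-- getD on a pair of replicate-runs
lemma getD_rep_rep (a b i : Nat) (x y : Int) (h : i < a + b) :
    (List.replicate a x ++ List.replicate b y).getD i 0 = if i < a then x else y := by
  rcases lt_or_ge i a with hi | hi
  · rw [List.getD_eq_getElem _ _ (by simp only [List.length_append, List.length_replicate]; omega)]
    rw [List.getElem_append_left (by simp only [List.length_replicate]; omega)]
    simp [hi]
  · rw [List.getD_eq_getElem _ _ (by simp only [List.length_append, List.length_replicate]; omega)]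
    rw [List.getElem_append_right (by simp only [List.length_replicate]; omega)]
    simp only [List.getElem_replicate]
    rw [if_neg (by omega)]

-- B's i-th column-sampled row equals A's i-th row
lemma row_eq (ql : Int) (h3 : 3 ≤ ql) (i : Nat) (hi : (i : Int) < ql - 2) :
    ((PySem.List.pyRange 0 ql 1).map (fun j =>
        if 1 ≤ j ∧ j ≤ ql - 2 then
          List.replicate (j - 1).toNat 0 ++ List.replicate (ql - 2 - j + 1).toNat 1
        else List.replicate (ql - 2).toNat 0)).map (fun c => c.getD i 0)
      = pvRow ql i := by
  rw [PySem.List.pyRange_one, List.map_map, List.map_map]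
  apply List.ext_getElem
  · simp only [List.length_map, List.length_range, pvRow, List.length_cons,
      List.length_append, List.length_replicate]
    omega
  · intro j hj hj'
    simp only [List.getElem_map, List.getElem_range, Function.comp_apply, zero_add]
    by_cases h1 : 1 ≤ (j : Int) ∧ (j : Int) ≤ ql - 2
    · rw [if_pos h1]
      rw [getD_rep_rep _ _ _ _ _ (by omega)]
      have hj1 : ∃ k, j = k + 1 := ⟨j - 1, by omega⟩
      obtain ⟨k, rfl⟩ := hj1
      simp only [pvRow, List.getElem_cons_succ]
      by_cases hk : k < i + 1
      · rw [List.getElem_append_left (by simp only [List.length_replicate]; omega)]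
        rw [List.getElem_replicate]
        rw [if_neg (by omega)]
      · rw [List.getElem_append_right (by simp only [List.length_replicate]; omega)]
        rw [List.getElem_replicate]
        rw [if_pos (by omega)]
    · rw [if_neg h1]
      rw [List.getD_eq_getElem _ _ (by simp only [List.length_replicate]; omega)]
      rw [List.getElem_replicate]
      rcases (by omega : j = 0 ∨ (ql - 2 : Int) < (j : Int)) with rfl | hbig
      · simp [pvRow]
      · have hj1 : ∃ k, j = k + 1 := ⟨j - 1, by omega⟩
        obtain ⟨k, rfl⟩ := hj1
        simp only [pvRow, List.getElem_cons_succ]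
        rw [List.getElem_append_right (by simp only [List.length_replicate]; omega)]
        rw [List.getElem_replicate]

theorem equal_all (ql : Int) :
    calculate_click_tokens ql = calculate_click_tokens_alt ql := by
  by_cases h : 3 ≤ ql
  · unfold calculate_click_tokens calculate_click_tokens_alt
    simp only []
    rw [if_pos (by omega)]
    have hq : ql - 2 = (((ql - 2).toNat : Nat) : Int) := by omega
    rw [hq, loop_inv ql h (ql - 2).toNat (by omega)]
    refine Prod.ext ?_ rfl
    simp only []
    rw [zipStar_uniform ((ql - 2).toNat) _
        (by simp only [ne_eq, List.map_eq_nil_iff, PySem.List.pyRange_one,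
              List.map_eq_nil_iff, List.range_eq_nil]; omega)
        (by
          intro c hc
          obtain ⟨j, hj, rfl⟩ := List.mem_map.mp hc
          have hjm := PySem.List.mem_pyRange_one.mp hj
          split_ifs with hcond
          · simp only [List.length_append, List.length_replicate]; omega
          · simp only [List.length_replicate]; omega)]
    rw [← hq]
    apply List.map_congr_left
    intro i hi
    have hilt : (i : Int) < ql - 2 := by
      have := List.mem_range.mp hi
      omega
    exact (row_eq ql h i hilt).symm
  · have hnil : PySem.List.pyRange 0 (ql - 2) 1 = [] :=
      PySem.List.pyRange_one_eq_nil (by omega)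
    unfold calculate_click_tokens calculate_click_tokens_alt
    simp only []
    rw [if_neg (by omega)]
    simp [hnil]

-- ===== VERDICT (by name: the statement is the Claim_ definition above) =====
theorem calculate_click_tokens_spec : Claim_equal_calculate_click_tokens := by
  intro ql _
  exact equal_all ql
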